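-- pv_equiv track=rewrite | github.com/preet1249/My-AI-Agent-team | apps/backend/app/agents/marketing_strategist.py | _extract_campaigns
-- ===== SOURCE A (Python) =====
-- def _extract_campaigns(response: str) -> list:
--     """
--     Extract campaign ideas from response
--
--     Args:
--         response: LLM response
--
--     Returns:
--         List of campaign dicts
--     """
--     campaigns = []
--     lines = response.split("\n")
--
--     current_campaign = None
--     for line in lines:
--         line = line.strip()
--
--         # Look for campaign headers
--         if any(keyword in line.lower() for keyword in ["campaign:", "strategy:", "idea:"]):
--             if current_campaign:
--                 campaigns.append(current_campaign)
--
--             current_campaign = {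
--                 "name": line.replace(":", "").strip(),
--                 "description": "",
--                 "channel": "email"  # default
--             }
--
--         elif current_campaign and line:
--             current_campaign["description"] += line + " "
--
--     if current_campaign:
--         campaigns.append(current_campaign)
--
--     return campaigns
-- ===== SOURCE B (Python) =====
-- def _extract_campaigns(response: str) -> list:
--     def is_header(ln):
--         low = ln.lower()
--         return "campaign:" in low or "strategy:" in low or "idea:" in low
--
--     lines = [ln.strip() for ln in response.split("\n")]
--     # drop everything before the first header line
--     rest = lines
--     while rest and not is_header(rest[0]):
--         rest = rest[1:]
--
--     campaigns = []
--     while rest: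
--         header, rest = rest[0], rest[1:]
--         body = []
--         while rest and not is_header(rest[0]):
--             body.append(rest[0])
--             rest = rest[1:]
--         desc = ""
--         for ln in body:
--             if ln:
--                 desc += ln + " "
--         campaigns.append({
--             "name": header.replace(":", "").strip(),
--             "description": desc,
--             "channel": "email",
--         })
--     return campaigns
-- ===== Notes on version B (the rewrite author's own statement) =====
-- stated objective: alternative
-- what changed: Replaces A's single pass with a running current-campaign accumulator by a two-phase decomposition: strip all lines, drop the preamble before the first header, then recursively cut the list into header-plus-body groups and build each campaign dict from its group.
import Mathlib
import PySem

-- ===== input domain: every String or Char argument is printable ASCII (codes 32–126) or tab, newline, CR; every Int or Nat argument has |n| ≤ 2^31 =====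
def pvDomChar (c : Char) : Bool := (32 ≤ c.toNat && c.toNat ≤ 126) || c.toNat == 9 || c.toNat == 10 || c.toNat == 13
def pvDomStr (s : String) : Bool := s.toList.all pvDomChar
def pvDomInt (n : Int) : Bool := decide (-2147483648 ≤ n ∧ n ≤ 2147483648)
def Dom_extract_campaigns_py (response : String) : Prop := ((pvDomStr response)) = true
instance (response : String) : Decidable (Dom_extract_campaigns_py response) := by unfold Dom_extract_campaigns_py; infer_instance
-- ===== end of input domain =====

-- B re-implements A's running-accumulator pass as a two-phase split: drop the preamble, then
-- recursively cut the line list into header-plus-body groups (alternative decomposition, same cost).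

-- ===== PORT A =====
-- the loop body of A's single for-loop (state: campaigns so far, current campaign dict or none)
def pvStepA (st : List (PySem.Dict String String) × Option (PySem.Dict String String))
    (line : String) : List (PySem.Dict String String) × Option (PySem.Dict String String) :=
  let line := PySem.Str.strip line
  if (["campaign:", "strategy:", "idea:"] : List String).any
      (fun keyword => PySem.Str.isIn keyword (PySem.Str.lower line)) then
    let campaigns := match st.2 with | some c => st.1 ++ [c] | none => st.1
    (campaigns,
      some (((PySem.Dict.empty.insert "name"
                (PySem.Str.strip (PySem.Str.replace line ":" ""))).insert "description" "").insert
              "channel" "email"))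
  else if st.2.isSome && !(line == "") then
    -- current_campaign["description"] += line + " " : the key is always present, so modify with default "" is exact
    (st.1, st.2.map (fun c => c.modify "description" "" (fun d => d ++ line ++ " ")))
  else st

-- the trailing 'if current_campaign: campaigns.append(current_campaign)'
def pvFinishA (st : List (PySem.Dict String String) × Option (PySem.Dict String String)) :
    List (PySem.Dict String String) :=
  match st.2 with | some c => st.1 ++ [c] | none => st.1

def extract_campaigns_py (response : String) : List (List (String × String)) :=
  -- response.split("\n"): exact via Chars.splitOn, the separator is nonempty
  let lines := (PySem.Chars.splitOn response.toList ['\n']).map String.ofList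
  let st := lines.foldl pvStepA ([], none)
  (pvFinishA st).map PySem.Dict.items

-- ===== PORT B =====
def pvIsHeader (ln : String) : Bool :=
  let low := PySem.Str.lower ln
  PySem.Str.isIn "campaign:" low || PySem.Str.isIn "strategy:" low || PySem.Str.isIn "idea:" low

-- the 'for ln in body: if ln: desc += ln + " "' loop ('if ln:' written branch-swapped as an if-then-else)
def pvDesc (body : List String) : String :=
  body.foldl (fun desc ln => if ln = "" then desc else desc ++ ln ++ " ") ""

-- the outer 'while rest:' loop: cut one header + its body off the front, recurse on the remainder
def pvGroups : List String → List (List (String × String))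
  | [] => []
  | header :: rest =>
    let body := rest.takeWhile (fun ln => !pvIsHeader ln)
    let rest' := rest.dropWhile (fun ln => !pvIsHeader ln)
    [("name", PySem.Str.strip (PySem.Str.replace header ":" "")),
     ("description", pvDesc body),
     ("channel", "email")] :: pvGroups rest'
  termination_by ls => ls.length
  decreasing_by
    simp only [List.length_cons]
    have := List.length_dropWhile_le (p := fun ln => !pvIsHeader ln) (l := rest)
    omega

def extract_campaigns_py_alt (response : String) : List (List (String × String)) :=
  -- response.split("\n"): exact via Chars.splitOn, the separator is nonempty
  let lines := ((PySem.Chars.splitOn response.toList ['\n']).map String.ofList).map PySem.Str.strip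
  pvGroups (lines.dropWhile (fun ln => !pvIsHeader ln))

-- ===== PRECONDITION & SPEC =====
def Spec_extract_campaigns_py (response : String) (out : List (List (String × String))) : Prop := out = extract_campaigns_py_alt response
instance (response : String) (out : List (List (String × String))) : Decidable (Spec_extract_campaigns_py response out) := by unfold Spec_extract_campaigns_py; infer_instance

-- ===== CLAIM (what is proved, stated in full; the proofs are below) =====
def Claim_equal_extract_campaigns_py : Prop := ∀ (response : String), Dom_extract_campaigns_py response → Spec_extract_campaigns_py response (extract_campaigns_py response)

-- ===== LEMMAS AND PROOFS =====

-- the campaign dict A builds, as a function of its two varying fields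
def pvDictC (n d : String) : PySem.Dict String String :=
  ((PySem.Dict.empty.insert "name" n).insert "description" d).insert "channel" "email"

def pvMkC (n d : String) : List (String × String) :=
  [("name", n), ("description", d), ("channel", "email")]

theorem pv_items_dictC (n d : String) : (pvDictC n d).items = pvMkC n d := by
  simp [pvDictC, pvMkC, PySem.Dict.empty, PySem.Dict.insert, PySem.Dict.contains]

theorem pv_modify_dictC (n d l : String) :
    (pvDictC n d).modify "description" "" (fun s => s ++ l ++ " ") =
      pvDictC n (d ++ l ++ " ") := by
  simp [pvDictC, PySem.Dict.empty, PySem.Dict.insert, PySem.Dict.modify,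
    PySem.Dict.contains, PySem.Dict.get?, PySem.Dict.getD]

theorem pv_hdr_eq (l : String) :
    ((["campaign:", "strategy:", "idea:"] : List String).any
      (fun keyword => PySem.Str.isIn keyword (PySem.Str.lower l))) = pvIsHeader l := by
  simp [pvIsHeader, List.any, Bool.or_assoc]

theorem pv_str_append_empty (a : String) : a ++ "" = a := by
  apply String.ext; simp

theorem pv_str_empty_append (a : String) : "" ++ a = a := by
  apply String.ext; simp

theorem pv_desc_factor (body : List String) (a : String) :
    body.foldl (fun desc ln => if ln = "" then desc else desc ++ ln ++ " ") a =
      a ++ pvDesc body := by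
  induction body generalizing a with
  | nil => exact (pv_str_append_empty a).symm
  | cons x t ih =>
    simp only [pvDesc, List.foldl]
    by_cases hx : x = ""
    · rw [if_pos hx, if_pos hx]; exact ih a
    · rw [if_neg hx, if_neg hx, ih (a ++ x ++ " "), ih ("" ++ x ++ " ")]
      apply String.ext; simp

theorem pv_desc_cons_empty (t : List String) : pvDesc ("" :: t) = pvDesc t := by
  simp only [pvDesc, List.foldl]
  simp

theorem pv_desc_cons (x : String) (t : List String) (hx : x ≠ "") :
    pvDesc (x :: t) = x ++ " " ++ pvDesc t := by
  simp only [pvDesc, List.foldl, if_neg hx]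
  rw [pv_desc_factor, pv_str_empty_append]
  exact congrArg (· ++ pvDesc t) rfl

theorem pv_groups_cons (h : String) (t : List String) :
    pvGroups (h :: t) =
      pvMkC (PySem.Str.strip (PySem.Str.replace h ":" ""))
          (pvDesc (t.takeWhile (fun ln => !pvIsHeader ln))) ::
        pvGroups (t.dropWhile (fun ln => !pvIsHeader ln)) := by
  rw [pvGroups]; rfl

-- step-shape lemmas for A's loop body
theorem pv_stepA_header (st : List (PySem.Dict String String) × Option (PySem.Dict String String))
    (l : String) (hh : pvIsHeader (PySem.Str.strip l) = true) :
    pvStepA st l =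
      (pvFinishA st,
        some (pvDictC (PySem.Str.strip (PySem.Str.replace (PySem.Str.strip l) ":" "")) "")) := by
  simp only [pvStepA, pv_hdr_eq, hh, if_true, pvFinishA, pvDictC]

theorem pv_stepA_skip_none (acc : List (PySem.Dict String String)) (l : String)
    (hh : pvIsHeader (PySem.Str.strip l) = false) :
    pvStepA (acc, none) l = (acc, none) := by
  simp only [pvStepA, pv_hdr_eq, hh, Bool.false_eq_true, if_false, Option.isSome_none,
    Bool.false_and]

theorem pv_stepA_skip_empty (acc : List (PySem.Dict String String))
    (c : PySem.Dict String String) (l : String)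
    (hh : pvIsHeader (PySem.Str.strip l) = false) (he : PySem.Str.strip l = "") :
    pvStepA (acc, some c) l = (acc, some c) := by
  simp only [pvStepA, pv_hdr_eq, hh, Bool.false_eq_true, if_false]
  simp [he]

theorem pv_stepA_body (acc : List (PySem.Dict String String)) (n d : String) (l : String)
    (hh : pvIsHeader (PySem.Str.strip l) = false) (he : PySem.Str.strip l ≠ "") :
    pvStepA (acc, some (pvDictC n d)) l =
      (acc, some (pvDictC n (d ++ PySem.Str.strip l ++ " "))) := by
  simp only [pvStepA, pv_hdr_eq, hh, Bool.false_eq_true, if_false, Option.isSome_some,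
    Bool.true_and, Option.map_some]
  rw [if_pos (by simp [he]), pv_modify_dictC]

theorem pv_loopA (ls : List String) (acc : List (PySem.Dict String String))
    (cur : Option (String × String)) :
    (pvFinishA (ls.foldl pvStepA (acc, cur.map (fun p => pvDictC p.1 p.2)))).map
        PySem.Dict.items =
      acc.map PySem.Dict.items ++
        (match cur with
         | none => pvGroups ((ls.map PySem.Str.strip).dropWhile (fun x => !pvIsHeader x))
         | some (n, d) =>
             pvMkC n (d ++ pvDesc ((ls.map PySem.Str.strip).takeWhile (fun x => !pvIsHeader x))) ::
               pvGroups ((ls.map PySem.Str.strip).dropWhile (fun x => !pvIsHeader x))) := by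
  induction ls generalizing acc cur with
  | nil =>
    rcases cur with _ | ⟨n, d⟩
    · simp [pvFinishA, pvGroups]
    · simp [pvFinishA, pvDesc, pv_items_dictC, pvGroups]
  | cons l t ih =>
    simp only [List.foldl, List.map_cons]
    by_cases hh : pvIsHeader (PySem.Str.strip l) = true
    · -- header line: flush current (if any), start a fresh campaign
      rw [pv_stepA_header _ _ hh]
      have h2 := ih (pvFinishA (acc, cur.map (fun p => pvDictC p.1 p.2)))
        (some (PySem.Str.strip (PySem.Str.replace (PySem.Str.strip l) ":" ""), ""))
      simp only [Option.map_some] at h2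
      rw [h2]
      rcases cur with _ | ⟨n, d⟩
      · simp only [Option.map_none, pvFinishA]
        rw [List.dropWhile_cons_of_neg (by simp [hh]), pv_groups_cons]
        rw [pv_str_empty_append]
      · simp only [Option.map_some, pvFinishA]
        rw [List.dropWhile_cons_of_neg (by simp [hh]),
          List.takeWhile_cons_of_neg (by simp [hh]), pv_groups_cons]
        simp only [List.map_append, pv_items_dictC, List.map_cons, List.map_nil]
        rw [pv_str_empty_append]
        simp [pvDesc]
    · have hh' : pvIsHeader (PySem.Str.strip l) = false := by simpa using hh
      rcases cur with _ | ⟨n, d⟩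
      · -- no current campaign, non-header line: nothing happens
        simp only [Option.map_none]
        rw [pv_stepA_skip_none _ _ hh']
        have h2 := ih acc (cur := none)
        simp only [Option.map_none] at h2
        rw [h2, List.dropWhile_cons_of_pos (by simp [hh'])]
      · by_cases he : PySem.Str.strip l = ""
        · -- empty line: skipped by A, and pvDesc skips it too
          simp only [Option.map_some]
          rw [pv_stepA_skip_empty _ _ _ hh' he]
          have h2 := ih acc (cur := some (n, d))
          simp only [Option.map_some] at h2
          rw [h2, List.dropWhile_cons_of_pos (by simp [hh']),
            List.takeWhile_cons_of_pos (by simp [hh']), he, pv_desc_cons_empty]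
        · -- body line: appended to the description on both sides
          simp only [Option.map_some]
          rw [pv_stepA_body _ _ _ _ hh' he]
          have h2 := ih acc (cur := some (n, d ++ PySem.Str.strip l ++ " "))
          simp only [Option.map_some] at h2
          rw [h2, List.dropWhile_cons_of_pos (by simp [hh']),
            List.takeWhile_cons_of_pos (by simp [hh']), pv_desc_cons _ _ he]
          have hs : ∀ (a b e : String), a ++ (b ++ " " ++ e) = a ++ b ++ " " ++ e := by
            intros; apply String.ext; simp
          rw [hs]

-- ===== VERDICT (by name: the statement is the Claim_ definition above) =====
theorem extract_campaigns_py_spec : Claim_equal_extract_campaigns_py := by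
  intro response _
  unfold Spec_extract_campaigns_py extract_campaigns_py extract_campaigns_py_alt
  have := pv_loopA ((PySem.Chars.splitOn response.toList ['\n']).map String.ofList) [] none
  simpa using this
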